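-- pv_equiv track=rewrite | github.com/hasmelkonyan/Homework-4 | homework4.py | count_till_one
-- ===== SOURCE A (Python) =====
-- def count_till_one(str1):
--     count1 = 0
--     for each_character in str1:
--         if each_character != ' ':
--             if each_character != "1":
--                 count1 += 1
--             else:
--                 break
--     return count1
-- ===== SOURCE B (Python) =====
-- def count_till_one(str1):
--     idx = str1.find('1')
--     if idx == -1:
--         idx = len(str1)
--     prefix = str1[:idx]
--     return len(prefix) - prefix.count(' ')
-- ===== Notes on version B (the rewrite author's own statement) =====
-- stated objective: faster
-- what changed: Replaces A's character-by-character Python loop with break by a loop-free locate-then-count decomposition (str.find, slicing, str.count), still one linear pass over the data but in C-level string primitives.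
import Mathlib
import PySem

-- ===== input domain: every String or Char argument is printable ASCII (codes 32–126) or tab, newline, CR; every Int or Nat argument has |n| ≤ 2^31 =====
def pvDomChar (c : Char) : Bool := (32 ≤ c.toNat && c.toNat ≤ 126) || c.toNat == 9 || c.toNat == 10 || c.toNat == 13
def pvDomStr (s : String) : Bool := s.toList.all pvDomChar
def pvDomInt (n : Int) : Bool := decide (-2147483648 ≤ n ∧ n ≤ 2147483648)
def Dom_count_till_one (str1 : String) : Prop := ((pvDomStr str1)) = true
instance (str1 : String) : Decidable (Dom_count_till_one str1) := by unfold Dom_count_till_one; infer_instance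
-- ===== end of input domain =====

-- B replaces A's scan-with-break by a locate-then-count decomposition (find / slice / count); objective: simpler.

-- ===== PORT A =====
-- the for-loop with break, as structural recursion over the characters with the running count
def pvLoopA : List Char → Int → Int
  | [], count1 => count1
  | ch :: rest, count1 =>
    if ch ≠ ' ' then
      (if ch ≠ '1' then pvLoopA rest (count1 + 1) else count1)
    else
      pvLoopA rest count1

def count_till_one (str1 : String) : Int := pvLoopA str1.toList 0

-- ===== PORT B =====
def count_till_one_alt (str1 : String) : Int :=
  let idx := PySem.Str.find str1 "1"
  let idx2 := if idx = -1 then PySem.Str.len str1 else idx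
  let pre := PySem.Str.slice str1 none (some idx2)
  PySem.Str.len pre - (PySem.Str.count pre " " : Int)

-- ===== PRECONDITION & SPEC =====
def Spec_count_till_one (str1 : String) (out : Int) : Prop := out = count_till_one_alt str1
instance (str1 : String) (out : Int) : Decidable (Spec_count_till_one str1 out) := by unfold Spec_count_till_one; infer_instance

-- ===== CLAIM (what is proved, stated in full; the proofs are below) =====
def Claim_equal_count_till_one : Prop := ∀ (str1 : String), Dom_count_till_one str1 → Spec_count_till_one str1 (count_till_one str1)

-- ===== LEMMAS AND PROOFS =====

-- A's loop counts the non-space characters of the prefix before the first '1'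
theorem pvLoopA_eq (l : List Char) (c : Int) :
    pvLoopA l c = c + ((l.takeWhile (fun ch => ch != '1')).countP (fun ch => ch != ' ') : Int) := by
  induction l generalizing c with
  | nil => simp [pvLoopA]
  | cons x xs ih =>
    by_cases hsp : x = ' '
    · subst hsp
      simp [pvLoopA, ih]
    · by_cases hone : x = '1'
      · subst hone
        simp [pvLoopA]
      · simp [pvLoopA, hsp, hone, ih, bne_iff_ne]
        omega

-- counting occurrences of a one-character pattern is counting that character
theorem pvCountGo_singleton (ch : Char) (l : List Char) (fuel : Nat) (acc : Nat)
    (h : l.length ≤ fuel) :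
    PySem.Chars.count.go [ch] fuel l acc = acc + l.count ch := by
  induction l generalizing fuel acc with
  | nil => cases fuel <;> simp [PySem.Chars.count.go]
  | cons x xs ih =>
    cases fuel with
    | zero => simp at h
    | succ n =>
      simp only [List.length_cons, Nat.add_le_add_iff_right] at h
      by_cases hx : ch = x
      · subst hx
        simp [PySem.Chars.count.go, List.isPrefixOf, ih _ _ h]
        omega
      · have : ([ch].isPrefixOf (x :: xs)) = false := by
          simp [List.isPrefixOf, hx]
        simp [PySem.Chars.count.go, this, ih _ _ h, Ne.symm hx]

theorem pvCount_singleton (ch : Char) (l : List Char) :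
    PySem.Chars.count l [ch] = l.count ch := by
  simp [PySem.Chars.count, pvCountGo_singleton ch l l.length 0 le_rfl]

-- the first index of '1' is the length of the takeWhile-prefix
theorem pvFirstIdx (l : List Char) (k : Nat)
    (h1 : l[k]? = some '1') (h2 : ∀ i, i < k → l[i]? ≠ some '1') :
    (l.takeWhile (fun ch => ch != '1')).length = k := by
  induction l generalizing k with
  | nil => simp at h1
  | cons x xs ih =>
    by_cases hx : x = '1'
    · subst hx
      cases k with
      | zero => simp
      | succ m => exact absurd rfl (h2 0 (Nat.succ_pos m))
    · cases k with
      | zero => simp at h1; exact absurd h1 hx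
      | succ m =>
        simp only [List.getElem?_cons_succ] at h1
        have := ih m h1 (fun i hi => by
          have := h2 (i + 1) (Nat.succ_lt_succ hi)
          simpa using this)
        simp [hx, bne_iff_ne, this]

theorem pvFind_one (l : List Char) :
    PySem.Chars.find l ['1'] =
      if '1' ∈ l then ((l.takeWhile (fun ch => ch != '1')).length : Int) else -1 := by
  by_cases hm : '1' ∈ l
  · have hinf : ['1'] <:+: l := by
      obtain ⟨s, t, rfl⟩ := List.append_of_mem hm
      exact ⟨s, t, by simp⟩
    have hnn : 0 ≤ PySem.Chars.find l ['1'] := (PySem.Chars.find_nonneg_iff l ['1']).mpr hinf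
    obtain ⟨hpre, hmin⟩ := PySem.Chars.find_spec hnn
    set k := (PySem.Chars.find l ['1']).toNat with hk
    have h1 : l[k]? = some '1' := by
      obtain ⟨t, ht⟩ := hpre
      have : (l.drop k).head? = some '1' := by rw [← ht]; simp
      rwa [List.head?_drop] at this
    have h2 : ∀ i, i < k → l[i]? ≠ some '1' := by
      intro i hi hcon
      refine hmin i hi ⟨l.drop (i + 1), ?_⟩
      obtain ⟨hlt, hv⟩ := List.getElem?_eq_some_iff.mp hcon
      rw [← List.getElem_cons_drop hlt, hv]
      rfl
    rw [if_pos hm, pvFirstIdx l k h1 h2, hk, Int.toNat_of_nonneg hnn]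
  · rw [if_neg hm]
    refine (PySem.Chars.find_eq_neg_one_iff l ['1']).mpr ?_
    intro hinf
    exact hm (hinf.subset (by simp))

theorem pvAlt_eq (str1 : String) :
    count_till_one_alt str1 =
      ((str1.toList.takeWhile (fun ch => ch != '1')).countP (fun ch => ch != ' ') : Int) := by
  have hfind : PySem.Str.find str1 "1" = PySem.Chars.find str1.toList ['1'] := by
    rw [PySem.Str.find_eq]
    rfl
  have hpre : (PySem.Str.slice str1 none
      (some (if PySem.Str.find str1 "1" = -1 then PySem.Str.len str1 else PySem.Str.find str1 "1"))).toList
      = str1.toList.takeWhile (fun ch => ch != '1') := by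
    set l := str1.toList with hl
    set p := l.takeWhile (fun ch => ch != '1') with hp
    rw [PySem.Str.toList_slice, PySem.Chars.slice_eq_listSlice, hfind, pvFind_one]
    by_cases hm : '1' ∈ l
    · rw [if_pos hm]
      have : ¬ ((p.length : Int) = -1) := by omega
      rw [if_neg this, PySem.List.slice_to_natCast, ← hl]
      exact (List.prefix_iff_eq_take.mp (List.takeWhile_prefix _)).symm
    · rw [if_neg hm, if_pos rfl, PySem.Str.len_eq, ← hl, PySem.List.slice_to_natCast, List.take_length]
      exact (List.takeWhile_eq_self_iff.mpr (fun x hx => by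
        simp only [bne_iff_ne, ne_eq]
        rintro rfl; exact hm hx)).symm
  show PySem.Str.len (PySem.Str.slice str1 none
      (some (if PySem.Str.find str1 "1" = -1 then PySem.Str.len str1 else PySem.Str.find str1 "1")))
    - (PySem.Str.count (PySem.Str.slice str1 none
      (some (if PySem.Str.find str1 "1" = -1 then PySem.Str.len str1 else PySem.Str.find str1 "1"))) " " : Int) = _
  rw [PySem.Str.len_eq, PySem.Str.count_eq, hpre]
  set p := str1.toList.takeWhile (fun ch => ch != '1') with hp
  have hcnt : PySem.Chars.count p " ".toList = p.count ' ' := pvCount_singleton ' ' p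
  rw [hcnt]
  have hlen := List.length_eq_countP_add_countP (l := p) (fun ch => ch != ' ')
  have hcp : p.count ' ' = p.countP (fun a => decide ¬(a != ' ') = true) := by
    rw [List.count]
    apply List.countP_congr
    intro x _
    by_cases h : x = ' ' <;> simp [h]
  omega

-- ===== VERDICT (by name: the statement is the Claim_ definition above) =====
theorem count_till_one_spec : Claim_equal_count_till_one := by
  intro str1 _
  unfold Spec_count_till_one count_till_one
  rw [pvAlt_eq, pvLoopA_eq, zero_add]
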